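-- pv_equiv track=rewrite | github.com/miliar/Code_Jam_Webscraper | solutions_python/solutions_year10_round0_nr3/528.py | go
-- ===== SOURCE A (Python) =====
-- def go(r,k,n,g):
--     cyclerounds=0
--     cycleeuro=0
--     euro=0
--     gpos=0
--     gset=set([0])
--     while r:
--
--         runk=k
--         numg=0
--         while g[gpos]<=runk and numg<n:
--
--             cycleeuro+=g[gpos]
--             euro+=g[gpos]
--             runk-=g[gpos]
--
--             gpos=(gpos+1)%n
--             numg+=1
--
--
--
--         cyclerounds+=1
--         r-=1
-- ##        if gpos in gset:
-- ##            if r>cyclerounds: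
-- ##                cycles=r/cyclerounds
-- ##                r-=cycles*cyclerounds
-- ##                euro+=cycles*cycleeuro
-- ##
-- ##        else:
-- ##            gset.add(gpos)
--     return euro
-- ===== SOURCE B (Python) =====
-- def go(r, k, n, g):
--     def ride(p):
--         # one rollercoaster run starting with group p at the head of the queue
--         earn = 0
--         count = 0
--         while count < n and g[p] <= k - earn:
--             earn += g[p]
--             p = (p + 1) % n
--             count += 1
--         return earn, p
--
--     memo = {}
--     total = 0
--     pos = 0
--     while r > 0:
--         if pos not in memo:
--             memo[pos] = ride(pos)
--         earn, pos = memo[pos]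
--         total += earn
--         r -= 1
--     return total
-- ===== Notes on version B (the rewrite author's own statement) =====
-- stated objective: faster
-- what changed: B memoizes each starting position's full ride (earnings, next head position) in a dict built on first visit, so the inner queue-boarding scan runs once per distinct position instead of once per round.
-- outside the precondition, e.g. on go(1, 2, 3, [5, 5]): A returns 0, B returns 0
import Mathlib
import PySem

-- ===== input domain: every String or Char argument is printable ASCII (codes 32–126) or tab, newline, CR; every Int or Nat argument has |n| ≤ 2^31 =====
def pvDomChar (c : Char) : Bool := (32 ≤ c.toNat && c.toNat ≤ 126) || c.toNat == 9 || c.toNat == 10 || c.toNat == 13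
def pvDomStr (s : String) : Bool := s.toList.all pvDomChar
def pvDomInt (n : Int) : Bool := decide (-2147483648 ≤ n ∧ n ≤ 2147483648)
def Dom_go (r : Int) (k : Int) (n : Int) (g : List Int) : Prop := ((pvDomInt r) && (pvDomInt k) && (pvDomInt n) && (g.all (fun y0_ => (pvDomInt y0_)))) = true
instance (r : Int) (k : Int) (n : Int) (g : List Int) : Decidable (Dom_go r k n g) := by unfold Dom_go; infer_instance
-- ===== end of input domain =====

-- B memoizes each starting position's full ride (earnings, next head position), so the
-- inner boarding scan runs once per distinct position instead of once per round.

-- ===== PORT A =====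
-- inner 'while g[gpos]<=runk and numg<n' loop; state (runk, euro, cycleeuro, gpos, numg),
-- returns the variables the outer loop reads afterwards: (euro, cycleeuro, gpos).
-- fuel n.toNat suffices: numg increases by 1 each pass and the guard needs numg < n.
def goInner (g : List Int) (n : Int) : Nat → Int → Int → Int → Int → Int → Int × Int × Int
  | 0, _, euro, ce, gpos, _ => (euro, ce, gpos)
  | fuel+1, runk, euro, ce, gpos, numg =>
    let gi := PySem.List.pyGetD g gpos 0
    if gi ≤ runk ∧ numg < n then
      goInner g n fuel (runk - gi) (euro + gi) (ce + gi) (PySem.Int.mod (gpos + 1) n) (numg + 1)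
    else (euro, ce, gpos)

-- outer 'while r:' loop; state (euro, cycleeuro, gpos, cyclerounds); fuel r.toNat.
def goOuter (g : List Int) (k n : Int) : Nat → Int → Int → Int → Int → Int
  | 0, euro, _, _, _ => euro
  | fuel+1, euro, ce, gpos, cr =>
    let s := goInner g n n.toNat k euro ce gpos 0
    goOuter g k n fuel s.1 s.2.1 s.2.2 (cr + 1)

def go (r : Int) (k : Int) (n : Int) (g : List Int) : Int :=
  goOuter g k n r.toNat 0 0 0 0

-- ===== PORT B =====
-- 'ride(p)': one run from head position p; state (earn, p, count); returns (earn, next p).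
def rideLoop (g : List Int) (k n : Int) : Nat → Int → Int → Int → Int × Int
  | 0, earn, p, _ => (earn, p)
  | fuel+1, earn, p, count =>
    let gi := PySem.List.pyGetD g p 0
    if count < n ∧ gi ≤ k - earn then
      rideLoop g k n fuel (earn + gi) (PySem.Int.mod (p + 1) n) (count + 1)
    else (earn, p)

def ride (g : List Int) (k : Int) (n : Int) (p : Int) : Int × Int :=
  rideLoop g k n n.toNat 0 p 0

-- 'while r > 0:' with the memo dict; state (memo, total, pos); fuel r.toNat.
def goAltLoop (g : List Int) (k n : Int) : Nat → PySem.Dict Int (Int × Int) → Int → Int → Int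
  | 0, _, total, _ => total
  | fuel+1, memo, total, pos =>
    match memo.get? pos with
    | some v => goAltLoop g k n fuel memo (total + v.1) v.2
    | none =>
      let v := ride g k n pos
      goAltLoop g k n fuel (memo.insert pos v) (total + v.1) v.2

def go_alt (r : Int) (k : Int) (n : Int) (g : List Int) : Int :=
  goAltLoop g k n r.toNat PySem.Dict.empty 0 0

-- ===== PRECONDITION & SPEC =====
-- Pre_ excludes: r < 0 (A loops forever), and r > 0 with g empty or with n > len(g)
-- (malformed input outside the problem's contract n = len(g): A then raises IndexError on
-- g[gpos] for most configurations, and any returned value is accidental).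
def Pre_go (r : Int) (k : Int) (n : Int) (g : List Int) : Prop :=
  0 ≤ r ∧ (r = 0 ∨ (g ≠ [] ∧ n ≤ (g.length : Int)))
instance (r : Int) (k : Int) (n : Int) (g : List Int) : Decidable (Pre_go r k n g) := by
  unfold Pre_go; infer_instance

def pvWitness_go : Int × Int × Int × List Int := (3, 10, 3, [2, 5, 4])

def Spec_go (r : Int) (k : Int) (n : Int) (g : List Int) (out : Int) : Prop := out = go_alt r k n g
instance (r : Int) (k : Int) (n : Int) (g : List Int) (out : Int) : Decidable (Spec_go r k n g out) := by unfold Spec_go; infer_instance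

-- ===== CLAIM (what is proved, stated in full; the proofs are below) =====
def Claim_equal_go : Prop := ∀ (r : Int) (k : Int) (n : Int) (g : List Int), Dom_go r k n g → Pre_go r k n g → Spec_go r k n g (go r k n g)

-- ===== LEMMAS AND PROOFS =====

-- the sequence of per-round earnings both loops produce, abstracted
def simRounds (g : List Int) (k n : Int) : Nat → Int → Int
  | 0, _ => 0
  | fuel+1, p => (ride g k n p).1 + simRounds g k n fuel (ride g k n p).2

theorem goInner_eq_rideLoop (g : List Int) (k n : Int) :
    ∀ (fuel : Nat) (earn e c p cnt : Int),
      goInner g n fuel (k - earn) (e + earn) (c + earn) p cnt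
        = (e + (rideLoop g k n fuel earn p cnt).1,
           c + (rideLoop g k n fuel earn p cnt).1,
           (rideLoop g k n fuel earn p cnt).2) := by
  intro fuel
  induction fuel with
  | zero => intro earn e c p cnt; simp [goInner, rideLoop]
  | succ f ih =>
    intro earn e c p cnt
    simp only [goInner, rideLoop]
    by_cases h : cnt < n ∧ PySem.List.pyGetD g p 0 ≤ k - earn
    · rw [if_pos ⟨h.2, h.1⟩, if_pos h]
      have h1 : k - earn - PySem.List.pyGetD g p 0 = k - (earn + PySem.List.pyGetD g p 0) := by ring
      have h2 : e + earn + PySem.List.pyGetD g p 0 = e + (earn + PySem.List.pyGetD g p 0) := by ring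
      have h3 : c + earn + PySem.List.pyGetD g p 0 = c + (earn + PySem.List.pyGetD g p 0) := by ring
      rw [h1, h2, h3, ih]
    · have h' : ¬ (PySem.List.pyGetD g p 0 ≤ k - earn ∧ cnt < n) := fun hc => h ⟨hc.2, hc.1⟩
      rw [if_neg h', if_neg h]

theorem goInner_round (g : List Int) (k n : Int) (e c p : Int) :
    goInner g n n.toNat k e c p 0
      = (e + (ride g k n p).1, c + (ride g k n p).1, (ride g k n p).2) := by
  have := goInner_eq_rideLoop g k n n.toNat 0 e c p 0
  simpa [ride] using this

theorem goOuter_eq_simRounds (g : List Int) (k n : Int) :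
    ∀ (fuel : Nat) (e c p cr : Int),
      goOuter g k n fuel e c p cr = e + simRounds g k n fuel p := by
  intro fuel
  induction fuel with
  | zero => intro e c p cr; simp [goOuter, simRounds]
  | succ f ih =>
    intro e c p cr
    simp only [goOuter, simRounds, goInner_round, ih]
    ring

theorem goAltLoop_eq_simRounds (g : List Int) (k n : Int) :
    ∀ (fuel : Nat) (memo : PySem.Dict Int (Int × Int)) (total pos : Int),
      (∀ q v, memo.get? q = some v → v = ride g k n q) →
      goAltLoop g k n fuel memo total pos = total + simRounds g k n fuel pos := by
  intro fuel
  induction fuel with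
  | zero => intro memo total pos _; simp [goAltLoop, simRounds]
  | succ f ih =>
    intro memo total pos hinv
    simp only [goAltLoop]
    cases hm : memo.get? pos with
    | some v =>
      have hv : v = ride g k n pos := hinv pos v hm
      show goAltLoop g k n f memo (total + v.1) v.2 = _
      rw [ih memo _ _ hinv, hv, simRounds]
      ring
    | none =>
      have hinv' : ∀ q v, (memo.insert pos (ride g k n pos)).get? q = some v → v = ride g k n q := by
        intro q v hq
        rw [PySem.Dict.get?_insert] at hq
        split_ifs at hq with hqp
        · cases hq; subst hqp; rfl
        · exact hinv q v hq
      show goAltLoop g k n f (memo.insert pos (ride g k n pos))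
            (total + (ride g k n pos).1) (ride g k n pos).2 = _
      rw [ih _ _ _ hinv', simRounds]
      ring

-- ===== VERDICT (by name: the statement is the Claim_ definition above) =====
theorem go_spec : Claim_equal_go := by
  intro r k n g _ _
  unfold Spec_go go go_alt
  rw [goOuter_eq_simRounds, goAltLoop_eq_simRounds]
  intro q v hq
  simp [PySem.Dict.get?_empty] at hq
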